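-- pv_equiv track=rewrite | github.com/AgatheJsnd/BDD-2 | src/tag_engine.py | _build_style
-- ===== SOURCE A (Python) =====
-- from typing import Dict, List
--
-- def _build_style(analysis: Dict) -> Dict:
--     style = {}
--
--     # Couleurs
--     colors_raw = analysis.get('couleurs_raw', [])
--     if colors_raw:
--         c_struct = {'neutres_intemporelles': [], 'tons_chauds': [], 'tons_froids': [], 'pastels': [], 'metalliques': []}
--         for c in colors_raw:
--             if c in ['noir', 'blanc', 'beige', 'gris', 'marine']: c_struct['neutres_intemporelles'].append(c.capitalize())
--             elif c in ['cognac', 'marron', 'bordeaux', 'rouge', 'orange']: c_struct['tons_chauds'].append(c.capitalize())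
--             elif c in ['bleu', 'vert', 'kaki', 'violet']: c_struct['tons_froids'].append(c.capitalize())
--             elif c in ['or', 'argent', 'bronze']: c_struct['metalliques'].append(c.capitalize())
--
--         # Clean empty lists
--         style['couleurs_preferees'] = {k: v for k, v in c_struct.items() if v}
--
--     # Matières
--     mat_raw = analysis.get('matieres_raw', [])
--     if mat_raw:
--         m_struct = {'naturelles': [], 'premium': [], 'techniques': [], 'alternatives': []}
--         for m in mat_raw:
--             if m in ['cuir', 'cachemire', 'soie', 'laine', 'coton', 'lin', 'denim']: m_struct['naturelles'].append(m.capitalize())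
--             elif m == 'vegan': m_struct['alternatives'].append('Matières vegan')
--         style['matieres_preferees'] = {k: v for k, v in m_struct.items() if v}
--
--     # Pièces
--     pieces_raw = analysis.get('pieces_raw', [])
--     if pieces_raw:
--         p_struct = {}
--         if 'sacs' in pieces_raw: p_struct['sacs'] = ['Sac à main']
--         if 'chaussures' in pieces_raw: p_struct['chaussures'] = ['Baskets / Sneakers']
--         if 'manteaux' in pieces_raw: p_struct['manteaux'] = ['Veste légère']
--         if 'accessoires' in pieces_raw: p_struct['accessoires'] = ['Montres']
--         style['pieces_favorites'] = p_struct
--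
--     return style
-- ===== SOURCE B (Python) =====
-- from typing import Dict, List
--
-- # Constant tables: bucket name -> member colors (bucket order = output key order).
-- _COLOR_BUCKETS = [
--     ('neutres_intemporelles', ('noir', 'blanc', 'beige', 'gris', 'marine')),
--     ('tons_chauds', ('cognac', 'marron', 'bordeaux', 'rouge', 'orange')),
--     ('tons_froids', ('bleu', 'vert', 'kaki', 'violet')),
--     ('metalliques', ('or', 'argent', 'bronze')),
-- ]
--
-- _NATURAL_MATS = ('cuir', 'cachemire', 'soie', 'laine', 'coton', 'lin', 'denim')
--
-- _PIECE_TABLE = [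
--     ('sacs', 'Sac à main'),
--     ('chaussures', 'Baskets / Sneakers'),
--     ('manteaux', 'Veste légère'),
--     ('accessoires', 'Montres'),
-- ]
--
--
-- def _hits(raw, members):
--     return [x.capitalize() for x in raw if x in members]
--
--
-- def _build_style(analysis: Dict) -> Dict:
--     style = {}
--
--     colors_raw = analysis.get('couleurs_raw', [])
--     if colors_raw:
--         style['couleurs_preferees'] = {
--             name: hits
--             for name, members in _COLOR_BUCKETS
--             if (hits := _hits(colors_raw, members))
--         }
--
--     mat_raw = analysis.get('matieres_raw', [])
--     if mat_raw:
--         m_struct = {}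
--         nat = _hits(mat_raw, _NATURAL_MATS)
--         if nat:
--             m_struct['naturelles'] = nat
--         alt = ['Matières vegan' for x in mat_raw if x == 'vegan']
--         if alt:
--             m_struct['alternatives'] = alt
--         style['matieres_preferees'] = m_struct
--
--     pieces_raw = analysis.get('pieces_raw', [])
--     if pieces_raw:
--         style['pieces_favorites'] = {k: [v] for k, v in _PIECE_TABLE if k in pieces_raw}
--
--     return style
-- ===== Notes on version B (the rewrite author's own statement) =====
-- stated objective: idiomatic
-- what changed: Replaces the single-pass if/elif dispatch into five mutable bucket lists plus a post-hoc empty-cleanup with constant module-level tables (bucket -> member colors, piece presence-table) and one filtering comprehension per bucket, so no mutable accumulator struct or cleanup pass exists.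
import Mathlib
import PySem

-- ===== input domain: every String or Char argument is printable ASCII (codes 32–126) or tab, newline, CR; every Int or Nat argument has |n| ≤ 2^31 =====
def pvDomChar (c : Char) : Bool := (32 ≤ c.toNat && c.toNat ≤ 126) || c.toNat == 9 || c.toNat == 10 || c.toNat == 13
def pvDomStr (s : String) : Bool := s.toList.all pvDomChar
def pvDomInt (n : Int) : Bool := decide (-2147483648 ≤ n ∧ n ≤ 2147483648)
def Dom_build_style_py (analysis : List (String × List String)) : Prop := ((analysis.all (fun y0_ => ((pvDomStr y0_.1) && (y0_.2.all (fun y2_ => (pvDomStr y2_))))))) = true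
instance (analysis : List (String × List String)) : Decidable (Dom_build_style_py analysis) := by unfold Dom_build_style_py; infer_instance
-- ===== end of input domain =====

-- B replaces A's one-pass if/elif dispatch into mutable buckets + empty-cleanup with constant
-- tables and one filtering comprehension per bucket (objective: idiomatic); return values only.

-- shared helper: s.capitalize(), exact on ASCII (first char uppercased, rest lowercased)
def pyCapitalize (s : String) : String :=
  match s.toList with
  | [] => s
  | c :: rest => String.ofList (PySem.Chars.upperChar c :: rest.map PySem.Chars.lowerChar)

-- ===== PORT A =====
-- state: the five bucket lists of c_struct in insertion order
def aColorStep (st : List String × List String × List String × List String × List String)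
    (c : String) : List String × List String × List String × List String × List String :=
  if c ∈ ["noir", "blanc", "beige", "gris", "marine"] then
    (st.1 ++ [pyCapitalize c], st.2.1, st.2.2.1, st.2.2.2.1, st.2.2.2.2)
  else if c ∈ ["cognac", "marron", "bordeaux", "rouge", "orange"] then
    (st.1, st.2.1 ++ [pyCapitalize c], st.2.2.1, st.2.2.2.1, st.2.2.2.2)
  else if c ∈ ["bleu", "vert", "kaki", "violet"] then
    (st.1, st.2.1, st.2.2.1 ++ [pyCapitalize c], st.2.2.2.1, st.2.2.2.2)
  else if c ∈ ["or", "argent", "bronze"] then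
    (st.1, st.2.1, st.2.2.1, st.2.2.2.1, st.2.2.2.2 ++ [pyCapitalize c])
  else st

-- state: the (naturelles, premium, techniques, alternatives) lists of m_struct
def aMatStep (st : List String × List String × List String × List String)
    (m : String) : List String × List String × List String × List String :=
  if m ∈ ["cuir", "cachemire", "soie", "laine", "coton", "lin", "denim"] then
    (st.1 ++ [pyCapitalize m], st.2.1, st.2.2.1, st.2.2.2)
  else if m = "vegan" then
    (st.1, st.2.1, st.2.2.1, st.2.2.2 ++ ["Matières vegan"])
  else st

def build_style_py (analysis : List (String × List String)) :
    List (String × List (String × List String)) :=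
  let d := PySem.Dict.mk analysis
  let style0 : List (String × List (String × List String)) := []
  -- Couleurs
  let colors_raw := d.getD "couleurs_raw" []
  let style1 :=
    if colors_raw ≠ [] then
      let st := colors_raw.foldl aColorStep ([], [], [], [], [])
      let c_struct : List (String × List String) :=
        [("neutres_intemporelles", st.1), ("tons_chauds", st.2.1), ("tons_froids", st.2.2.1),
         ("pastels", st.2.2.2.1), ("metalliques", st.2.2.2.2)]
      style0 ++ [("couleurs_preferees", c_struct.filter (fun kv => kv.2 ≠ []))]
    else style0
  -- Matières
  let mat_raw := d.getD "matieres_raw" []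
  let style2 :=
    if mat_raw ≠ [] then
      let st := mat_raw.foldl aMatStep ([], [], [], [])
      let m_struct : List (String × List String) :=
        [("naturelles", st.1), ("premium", st.2.1), ("techniques", st.2.2.1),
         ("alternatives", st.2.2.2)]
      style1 ++ [("matieres_preferees", m_struct.filter (fun kv => kv.2 ≠ []))]
    else style1
  -- Pièces
  let pieces_raw := d.getD "pieces_raw" []
  if pieces_raw ≠ [] then
    let p0 : List (String × List String) := []
    let p1 := if "sacs" ∈ pieces_raw then p0 ++ [("sacs", ["Sac à main"])] else p0
    let p2 := if "chaussures" ∈ pieces_raw then p1 ++ [("chaussures", ["Baskets / Sneakers"])] else p1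
    let p3 := if "manteaux" ∈ pieces_raw then p2 ++ [("manteaux", ["Veste légère"])] else p2
    let p4 := if "accessoires" ∈ pieces_raw then p3 ++ [("accessoires", ["Montres"])] else p3
    style2 ++ [("pieces_favorites", p4)]
  else style2

-- ===== PORT B =====
def bColorBuckets : List (String × List String) :=
  [("neutres_intemporelles", ["noir", "blanc", "beige", "gris", "marine"]),
   ("tons_chauds", ["cognac", "marron", "bordeaux", "rouge", "orange"]),
   ("tons_froids", ["bleu", "vert", "kaki", "violet"]),
   ("metalliques", ["or", "argent", "bronze"])]

def bNaturalMats : List String := ["cuir", "cachemire", "soie", "laine", "coton", "lin", "denim"]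

def bPieceTable : List (String × String) :=
  [("sacs", "Sac à main"), ("chaussures", "Baskets / Sneakers"),
   ("manteaux", "Veste légère"), ("accessoires", "Montres")]

def bHits (raw members : List String) : List String :=
  (raw.filter (fun x => members.contains x)).map pyCapitalize

def build_style_py_alt (analysis : List (String × List String)) :
    List (String × List (String × List String)) :=
  let d := PySem.Dict.mk analysis
  let colors_raw := d.getD "couleurs_raw" []
  let part1 : List (String × List (String × List String)) :=
    if colors_raw ≠ [] then
      [("couleurs_preferees",
        bColorBuckets.filterMap (fun nm =>
          let h := bHits colors_raw nm.2
          if h ≠ [] then some (nm.1, h) else none))]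
    else []
  let mat_raw := d.getD "matieres_raw" []
  let part2 : List (String × List (String × List String)) :=
    if mat_raw ≠ [] then
      let nat := bHits mat_raw bNaturalMats
      let alt := (mat_raw.filter (fun m => m == "vegan")).map (fun _ => "Matières vegan")
      [("matieres_preferees",
        (if nat ≠ [] then [("naturelles", nat)] else []) ++
        (if alt ≠ [] then [("alternatives", alt)] else []))]
    else []
  let pieces_raw := d.getD "pieces_raw" []
  let part3 : List (String × List (String × List String)) :=
    if pieces_raw ≠ [] then
      [("pieces_favorites",
        bPieceTable.filterMap (fun kv =>
          if pieces_raw.contains kv.1 then some (kv.1, [kv.2]) else none))]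
    else []
  part1 ++ part2 ++ part3

-- ===== PRECONDITION & SPEC =====
def Spec_build_style_py (analysis : List (String × List String)) (out : List (String × List (String × List String))) : Prop := out = build_style_py_alt analysis
instance (analysis : List (String × List String)) (out : List (String × List (String × List String))) : Decidable (Spec_build_style_py analysis out) := by unfold Spec_build_style_py; infer_instance

-- ===== CLAIM (what is proved, stated in full; the proofs are below) =====
def Claim_equal_build_style_py : Prop := ∀ (analysis : List (String × List String)), Dom_build_style_py analysis → Spec_build_style_py analysis (build_style_py analysis)

-- ===== LEMMAS AND PROOFS =====

theorem fold_colors (cs : List String) (a b c d e : List String) :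
    cs.foldl aColorStep (a, b, c, d, e) =
      (a ++ bHits cs ["noir", "blanc", "beige", "gris", "marine"],
       b ++ bHits cs ["cognac", "marron", "bordeaux", "rouge", "orange"],
       c ++ bHits cs ["bleu", "vert", "kaki", "violet"],
       d,
       e ++ bHits cs ["or", "argent", "bronze"]) := by
  induction cs generalizing a b c d e with
  | nil => simp [bHits]
  | cons x xs ih =>
    by_cases h1 : x ∈ (["noir", "blanc", "beige", "gris", "marine"] : List String)
    · simp only [List.mem_cons, List.not_mem_nil, or_false] at h1
      rcases h1 with rfl | rfl | rfl | rfl | rfl <;>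
        simp [List.foldl_cons, aColorStep, ih, bHits]
    · by_cases h2 : x ∈ (["cognac", "marron", "bordeaux", "rouge", "orange"] : List String)
      · simp only [List.mem_cons, List.not_mem_nil, or_false] at h2
        rcases h2 with rfl | rfl | rfl | rfl | rfl <;>
          simp [List.foldl_cons, aColorStep, ih, bHits]
      · by_cases h3 : x ∈ (["bleu", "vert", "kaki", "violet"] : List String)
        · simp only [List.mem_cons, List.not_mem_nil, or_false] at h3
          rcases h3 with rfl | rfl | rfl | rfl <;>
            simp [List.foldl_cons, aColorStep, ih, bHits]
        · by_cases h4 : x ∈ (["or", "argent", "bronze"] : List String)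
          · simp only [List.mem_cons, List.not_mem_nil, or_false] at h4
            rcases h4 with rfl | rfl | rfl <;>
              simp [List.foldl_cons, aColorStep, ih, bHits]
          · simp only [List.mem_cons, List.not_mem_nil, or_false, not_or] at h1 h2 h3 h4
            simp [List.foldl_cons, aColorStep, ih, bHits,
              h1.1, h1.2.1, h1.2.2.1, h1.2.2.2.1, h1.2.2.2.2,
              h2.1, h2.2.1, h2.2.2.1, h2.2.2.2.1, h2.2.2.2.2,
              h3.1, h3.2.1, h3.2.2.1, h3.2.2.2,
              h4.1, h4.2.1, h4.2.2]

theorem fold_mats (ms : List String) (a b c d : List String) :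
    ms.foldl aMatStep (a, b, c, d) =
      (a ++ bHits ms bNaturalMats, b, c,
       d ++ (ms.filter (fun m => m == "vegan")).map (fun _ => "Matières vegan")) := by
  induction ms generalizing a b c d with
  | nil => simp [bHits]
  | cons x xs ih =>
    by_cases h1 : x ∈ bNaturalMats
    · simp only [bNaturalMats, List.mem_cons, List.not_mem_nil, or_false] at h1
      rcases h1 with rfl | rfl | rfl | rfl | rfl | rfl | rfl <;>
        simp [List.foldl_cons, aMatStep, ih, bHits, bNaturalMats]
    · by_cases h2 : x = "vegan"
      · subst h2
        simp [List.foldl_cons, aMatStep, ih, bHits, bNaturalMats]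
      · simp only [bNaturalMats, List.mem_cons, List.not_mem_nil, or_false, not_or] at h1
        simp [List.foldl_cons, aMatStep, ih, bHits, bNaturalMats, h2,
          h1.1, h1.2.1, h1.2.2.1, h1.2.2.2.1, h1.2.2.2.2.1, h1.2.2.2.2.2.1, h1.2.2.2.2.2.2]

theorem colors_entry (cs : List String) :
    List.filter (fun kv => !decide (kv.2 = []))
      ([("neutres_intemporelles", bHits cs ["noir", "blanc", "beige", "gris", "marine"]),
        ("tons_chauds", bHits cs ["cognac", "marron", "bordeaux", "rouge", "orange"]),
        ("tons_froids", bHits cs ["bleu", "vert", "kaki", "violet"]),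
        ("pastels", ([] : List String)),
        ("metalliques", bHits cs ["or", "argent", "bronze"])] : List (String × List String)) =
      List.filterMap (fun x => if bHits cs x.2 = [] then none else some (x.1, bHits cs x.2))
        bColorBuckets := by
  by_cases h1 : bHits cs ["noir", "blanc", "beige", "gris", "marine"] = [] <;>
    by_cases h2 : bHits cs ["cognac", "marron", "bordeaux", "rouge", "orange"] = [] <;>
      by_cases h3 : bHits cs ["bleu", "vert", "kaki", "violet"] = [] <;>
        by_cases h4 : bHits cs ["or", "argent", "bronze"] = [] <;>
          simp [bColorBuckets, h1, h2, h3, h4]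

theorem mats_entry (ms : List String) :
    List.filter (fun kv => !decide (kv.2 = []))
      ([("naturelles", bHits ms bNaturalMats), ("premium", ([] : List String)),
        ("techniques", ([] : List String)),
        ("alternatives",
          List.replicate (List.filter (fun m => m == "vegan") ms).length "Matières vegan")] :
        List (String × List String)) =
      (if bHits ms bNaturalMats = [] then []
        else [("naturelles", bHits ms bNaturalMats)]) ++
        (if "vegan" ∈ ms then
          [("alternatives",
              List.replicate (List.filter (fun m => m == "vegan") ms).length "Matières vegan")]
        else []) := by
  by_cases hn : bHits ms bNaturalMats = [] <;> by_cases hv : "vegan" ∈ ms <;>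
    simp [hn, hv, List.replicate_eq_nil_iff, List.length_eq_zero_iff,
      List.filter_eq_nil_iff]

theorem pieces_entry (ps : List String) :
    ((if "accessoires" ∈ ps then
        (if "manteaux" ∈ ps then
            (if "chaussures" ∈ ps then
                (if "sacs" ∈ ps then [("sacs", ["Sac à main"])] else []) ++
                  [("chaussures", ["Baskets / Sneakers"])]
              else if "sacs" ∈ ps then [("sacs", ["Sac à main"])] else []) ++
              [("manteaux", ["Veste légère"])]
          else
            if "chaussures" ∈ ps then
              (if "sacs" ∈ ps then [("sacs", ["Sac à main"])] else []) ++
                [("chaussures", ["Baskets / Sneakers"])]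
            else if "sacs" ∈ ps then [("sacs", ["Sac à main"])] else []) ++
          [("accessoires", ["Montres"])]
      else
        if "manteaux" ∈ ps then
          (if "chaussures" ∈ ps then
              (if "sacs" ∈ ps then [("sacs", ["Sac à main"])] else []) ++
                [("chaussures", ["Baskets / Sneakers"])]
            else if "sacs" ∈ ps then [("sacs", ["Sac à main"])] else []) ++
            [("manteaux", ["Veste légère"])]
        else
          if "chaussures" ∈ ps then
            (if "sacs" ∈ ps then [("sacs", ["Sac à main"])] else []) ++
              [("chaussures", ["Baskets / Sneakers"])]
          else if "sacs" ∈ ps then [("sacs", ["Sac à main"])] else []) :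
        List (String × List String)) =
      List.filterMap (fun x => if x.1 ∈ ps then some (x.1, [x.2]) else none) bPieceTable := by
  by_cases hs : "sacs" ∈ ps <;> by_cases hc : "chaussures" ∈ ps <;>
    by_cases hm : "manteaux" ∈ ps <;> by_cases ha : "accessoires" ∈ ps <;>
      simp [bPieceTable, hs, hc, hm, ha]

-- ===== VERDICT (by name: the statement is the Claim_ definition above) =====
theorem build_style_py_spec : Claim_equal_build_style_py := by
  intro analysis _
  unfold Spec_build_style_py build_style_py build_style_py_alt
  simp only [fold_colors, fold_mats, List.nil_append]
  by_cases hc : (PySem.Dict.mk analysis).getD "couleurs_raw" [] = [] <;>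
    by_cases hm : (PySem.Dict.mk analysis).getD "matieres_raw" [] = [] <;>
      by_cases hp : (PySem.Dict.mk analysis).getD "pieces_raw" [] = [] <;>
        simp [hc, hm, hp, pieces_entry, colors_entry, mats_entry]
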